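-- pv_equiv track=rewrite | github.com/felipexp8/python | solucoes/felipe/felipe.exPy03.py | trivale
-- ===== SOURCE A (Python) =====
-- def trivale(maximo):
--     """
--     não otimizado
--     """
--     possibilidades = []
--
--     for x in range(1,maximo):
--
--         #bloco de força bruta:
--         for i in range(x):
--             for j in range(x):
--                 #exemplo: até 5 temos 3 e 4 cuja soma passa de 5
--                 if i+j == x:
--                     possibilidades.append( (i,j,x) )
--                 #else: loop disperdiçado
--
--     return possibilidades
-- ===== SOURCE B (Python) =====
-- def trivale(maximo):
--     """
--     direct construction: for each x, the only pairs (i, j) with i + j == x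
--     and 0 <= i, j < x are (i, x - i) for i = 1 .. x - 1
--     """
--     return [(i, x - i, x) for x in range(1, maximo) for i in range(1, x)]
-- ===== Notes on version B (the rewrite author's own statement) =====
-- stated objective: faster
-- what changed: Replaced the brute-force triple loop testing every (i,j) pair with a direct double loop emitting (i, x-i, x) for i in 1..x-1, eliminating the inner scan.
import Mathlib
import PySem

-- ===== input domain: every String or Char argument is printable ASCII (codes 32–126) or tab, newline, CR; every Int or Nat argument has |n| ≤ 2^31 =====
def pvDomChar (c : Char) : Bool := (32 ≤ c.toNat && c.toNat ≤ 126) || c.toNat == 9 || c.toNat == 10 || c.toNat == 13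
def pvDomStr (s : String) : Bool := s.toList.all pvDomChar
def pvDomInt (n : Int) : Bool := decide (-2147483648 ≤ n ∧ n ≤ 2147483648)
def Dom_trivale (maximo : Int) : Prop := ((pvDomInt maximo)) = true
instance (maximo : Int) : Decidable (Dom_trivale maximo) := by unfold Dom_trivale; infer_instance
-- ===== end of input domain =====

-- B replaces A's brute-force triple loop with a direct double loop emitting (i, x-i, x); objective: faster (asymptotic).

-- ===== PORT A =====
def trivale (maximo : Int) : List (List Int) :=
  (PySem.List.pyRange 1 maximo 1).foldl (fun poss x =>
    (PySem.List.pyRange 0 x 1).foldl (fun poss i =>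
      (PySem.List.pyRange 0 x 1).foldl (fun poss j =>
        if i + j = x then poss ++ [[i, j, x]] else poss) poss) poss) []

-- ===== PORT B =====
def trivale_alt (maximo : Int) : List (List Int) :=
  (PySem.List.pyRange 1 maximo 1).flatMap (fun x =>
    (PySem.List.pyRange 1 x 1).map (fun i => [i, x - i, x]))

-- ===== PRECONDITION & SPEC =====
def Spec_trivale (maximo : Int) (out : List (List Int)) : Prop := out = trivale_alt maximo
instance (maximo : Int) (out : List (List Int)) : Decidable (Spec_trivale maximo out) := by unfold Spec_trivale; infer_instance

-- ===== CLAIM (what is proved, stated in full; the proofs are below) =====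
def Claim_equal_trivale : Prop := ∀ (maximo : Int), Dom_trivale maximo → Spec_trivale maximo (trivale maximo)

-- ===== LEMMAS AND PROOFS =====

-- filtering the equality i + j = x out of range(0, x) leaves exactly [x - i] when 1 ≤ i < x
theorem pv_filter_eq (x i : Int) (h1 : 1 ≤ i) (h2 : i < x) :
    (PySem.List.pyRange 0 x 1).filter (fun j => decide (i + j = x)) = [x - i] := by
  have hL : (PySem.List.pyRange 0 (x - i) 1).filter (fun j => decide (i + j = x)) = [] :=
    List.filter_eq_nil_iff.mpr (fun j hj => by
      have := (PySem.List.mem_pyRange_one).mp hj; simp; omega)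
  have hR : (PySem.List.pyRange (x - i + 1) x 1).filter (fun j => decide (i + j = x)) = [] :=
    List.filter_eq_nil_iff.mpr (fun j hj => by
      have := (PySem.List.mem_pyRange_one).mp hj; simp; omega)
  rw [PySem.List.pyRange_one_append 0 (x - i) x (by omega) (by omega),
      PySem.List.pyRange_one_append (x - i) (x - i + 1) x (by omega) (by omega),
      PySem.List.pyRange_one_singleton, List.filter_append, List.filter_append, hL, hR]
  simp

-- a flatMap whose blocks are all singletons is a map
theorem pv_flatMap_eq_map {α β : Type} (l : List α) (g : α → List β) (f : α → β)
    (h : ∀ a ∈ l, g a = [f a]) : l.flatMap g = l.map f := by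
  induction l with
  | nil => rfl
  | cons a t ih =>
    simp only [List.flatMap_cons, List.map_cons, h a (List.mem_cons_self),
      ih (fun b hb => h b (List.mem_cons_of_mem a hb))]
    rfl

-- the j-loop followed by the i-loop over range(0, x) equals the direct map over range(1, x)
theorem pv_inner (x : Int) (acc : List (List Int)) :
    (PySem.List.pyRange 0 x 1).foldl (fun poss i =>
      (PySem.List.pyRange 0 x 1).foldl (fun poss j =>
        if i + j = x then poss ++ [[i, j, x]] else poss) poss) acc
    = acc ++ (PySem.List.pyRange 1 x 1).map (fun i => [i, x - i, x]) := by
  rw [PySem.List.foldl_congr_mem _ _ (fun poss i =>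
      poss ++ ((PySem.List.pyRange 0 x 1).filter (fun j => decide (i + j = x))).map
        (fun j => [i, j, x])) _
      (fun poss i _ => PySem.List.foldl_append_ite (fun j => i + j = x) (fun j => [i, j, x]) _ poss),
    PySem.List.foldl_append_eq_flatMap]
  congr 1
  by_cases hx : x ≤ 0
  · rw [PySem.List.pyRange_one_eq_nil hx, PySem.List.pyRange_one_eq_nil (by omega : x ≤ 1)]
    simp
  · nth_rewrite 2 [PySem.List.pyRange_one_cons (by omega : (0:Int) < x)]
    rw [List.flatMap_cons, List.filter_eq_nil_iff.mpr (fun j hj => by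
        have := (PySem.List.mem_pyRange_one).mp hj; simp; omega),
      List.map_nil, List.nil_append]
    simp only [zero_add]
    refine pv_flatMap_eq_map _ _ _ (fun i hi => ?_)
    have := (PySem.List.mem_pyRange_one).mp hi
    rw [pv_filter_eq x i this.1 this.2]
    rfl

-- ===== VERDICT (by name: the statement is the Claim_ definition above) =====
theorem trivale_spec : Claim_equal_trivale := by
  intro maximo _
  unfold Spec_trivale trivale trivale_alt
  rw [PySem.List.foldl_congr_mem _ _ (fun poss x =>
    poss ++ (PySem.List.pyRange 1 x 1).map (fun i => [i, x - i, x])) _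
    (fun acc x _ => pv_inner x acc)]
  exact PySem.List.foldl_append_eq_flatMap _ _ _
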